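-- pv_equiv track=rewrite | github.com/sean2474/arc-agi | agents/llm_agent/grid_utils.py | compute_bbox_from_grid
-- ===== SOURCE A (Python) =====
-- def compute_bbox_from_grid(grid: list[str], hex_value: str) -> dict | None:
--     """그리드에서 특정 색상(hex) 셀의 bounding box 계산."""
--     rows, cols = [], []
--     for y, row in enumerate(grid):
--         for x, cell in enumerate(row):
--             if cell == hex_value:
--                 rows.append(y)
--                 cols.append(x)
--     if not rows:
--         return None
--     return {"row_min": min(rows), "row_max": max(rows),
--             "col_min": min(cols), "col_max": max(cols)}
-- ===== SOURCE B (Python) =====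
-- def compute_bbox_from_grid(grid: list[str], hex_value: str) -> dict | None:
--     """Single pass keeping four scalar extrema instead of two lists + 4 min/max scans."""
--     found = False
--     row_min = row_max = col_min = col_max = 0
--     for y, row in enumerate(grid):
--         for x, cell in enumerate(row):
--             if cell == hex_value:
--                 if not found:
--                     found = True
--                     row_min = row_max = y
--                     col_min = col_max = x
--                 else:
--                     if y < row_min: row_min = y
--                     if y > row_max: row_max = y
--                     if x < col_min: col_min = x
--                     if x > col_max: col_max = x
--     if not found:
--         return None
--     return {"row_min": row_min, "row_max": row_max,
--             "col_min": col_min, "col_max": col_max}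
-- ===== Notes on version B (the rewrite author's own statement) =====
-- stated objective: simpler
-- what changed: Replaces collecting two coordinate lists and scanning them four times with min/max by a single pass that threads a found flag and four scalar extrema, using O(1) extra memory.
import Mathlib
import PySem

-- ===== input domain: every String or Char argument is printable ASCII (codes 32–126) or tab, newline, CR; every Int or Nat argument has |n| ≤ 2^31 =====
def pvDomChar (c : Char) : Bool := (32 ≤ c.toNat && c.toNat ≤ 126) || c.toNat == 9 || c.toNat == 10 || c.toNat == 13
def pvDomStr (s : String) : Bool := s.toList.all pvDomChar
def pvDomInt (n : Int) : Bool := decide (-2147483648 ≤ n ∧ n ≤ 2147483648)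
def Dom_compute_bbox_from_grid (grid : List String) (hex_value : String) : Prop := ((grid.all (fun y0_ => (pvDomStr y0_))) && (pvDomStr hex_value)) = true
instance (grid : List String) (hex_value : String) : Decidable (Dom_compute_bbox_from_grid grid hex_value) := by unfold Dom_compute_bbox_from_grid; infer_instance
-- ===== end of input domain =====

-- B keeps a found flag and four scalar extrema in one pass instead of building two
-- coordinate lists and scanning them four times with min/max (simpler: O(1) extra space).

-- ===== PORT A =====
-- literal port of A: collect rows/cols of matching cells, then min/max of each list
def compute_bbox_from_grid (grid : List String) (hex_value : String) : Option (List (String × Int)) :=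
  let rc : List Int × List Int :=
    (PySem.List.enumerate grid 0).foldl (fun rc yrow =>
      (PySem.List.enumerate yrow.2.toList 0).foldl (fun rc xcell =>
        if String.ofList [xcell.2] = hex_value then (rc.1 ++ [yrow.1], rc.2 ++ [xcell.1]) else rc)
        rc)
      ([], [])
  if rc.1 = [] then none
  else some [("row_min", (PySem.List.min? rc.1 (fun v => v)).getD 0),
             ("row_max", (PySem.List.max? rc.1 (fun v => v)).getD 0),
             ("col_min", (PySem.List.min? rc.2 (fun v => v)).getD 0),
             ("col_max", (PySem.List.max? rc.2 (fun v => v)).getD 0)]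

-- ===== PORT B =====
-- state = (found, row_min, row_max, col_min, col_max); update on a matching cell at (y, x)
def bboxStep (s : Bool × Int × Int × Int × Int) (y x : Int) : Bool × Int × Int × Int × Int :=
  if s.1 = false then (true, y, y, x, x)
  else (true,
        if y < s.2.1 then y else s.2.1,
        if y > s.2.2.1 then y else s.2.2.1,
        if x < s.2.2.2.1 then x else s.2.2.2.1,
        if x > s.2.2.2.2 then x else s.2.2.2.2)

def compute_bbox_from_grid_alt (grid : List String) (hex_value : String) : Option (List (String × Int)) :=
  let s : Bool × Int × Int × Int × Int :=
    (PySem.List.enumerate grid 0).foldl (fun s yrow =>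
      (PySem.List.enumerate yrow.2.toList 0).foldl (fun s xcell =>
        if String.ofList [xcell.2] = hex_value then bboxStep s yrow.1 xcell.1 else s)
        s)
      (false, 0, 0, 0, 0)
  if s.1 = false then none
  else some [("row_min", s.2.1), ("row_max", s.2.2.1),
             ("col_min", s.2.2.2.1), ("col_max", s.2.2.2.2)]

-- ===== PRECONDITION & SPEC =====
def Spec_compute_bbox_from_grid (grid : List String) (hex_value : String) (out : Option (List (String × Int))) : Prop := out = compute_bbox_from_grid_alt grid hex_value
instance (grid : List String) (hex_value : String) (out : Option (List (String × Int))) : Decidable (Spec_compute_bbox_from_grid grid hex_value out) := by unfold Spec_compute_bbox_from_grid; infer_instance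

-- ===== CLAIM (what is proved, stated in full; the proofs are below) =====
def Claim_equal_compute_bbox_from_grid : Prop := ∀ (grid : List String) (hex_value : String), Dom_compute_bbox_from_grid grid hex_value → Spec_compute_bbox_from_grid grid hex_value (compute_bbox_from_grid grid hex_value)

-- ===== LEMMAS AND PROOFS =====

-- the (y, x) coordinates of matching cells in one enumerated row
def rowMatches (hex_value : String) (y : Int) (cs : List (Int × Char)) : List (Int × Int) :=
  cs.filterMap (fun xc => if String.ofList [xc.2] = hex_value then some (y, xc.1) else none)

-- all matching coordinates of the enumerated grid, in traversal order
def gridMatches (hex_value : String) (l : List (Int × String)) : List (Int × Int) :=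
  l.flatMap (fun yr => rowMatches hex_value yr.1 (PySem.List.enumerate yr.2.toList 0))

lemma innerA (hex_value : String) (y : Int) (cs : List (Int × Char)) (rc : List Int × List Int) :
    cs.foldl (fun rc xc => if String.ofList [xc.2] = hex_value then (rc.1 ++ [y], rc.2 ++ [xc.1]) else rc) rc
      = (rc.1 ++ (rowMatches hex_value y cs).map Prod.fst,
         rc.2 ++ (rowMatches hex_value y cs).map Prod.snd) := by
  induction cs generalizing rc with
  | nil => simp [rowMatches]
  | cons c cs ih =>
    simp only [List.foldl_cons, rowMatches, List.filterMap_cons]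
    split
    · simpa [rowMatches, List.append_assoc] using ih (rc.1 ++ [y], rc.2 ++ [c.1])
    · simpa [rowMatches] using ih rc

lemma outerA (hex_value : String) (l : List (Int × String)) (rc : List Int × List Int) :
    l.foldl (fun rc yr =>
        (PySem.List.enumerate yr.2.toList 0).foldl (fun rc xc =>
          if String.ofList [xc.2] = hex_value then (rc.1 ++ [yr.1], rc.2 ++ [xc.1]) else rc) rc) rc
      = (rc.1 ++ (gridMatches hex_value l).map Prod.fst,
         rc.2 ++ (gridMatches hex_value l).map Prod.snd) := by
  induction l generalizing rc with
  | nil => simp [gridMatches]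
  | cons yr l ih =>
    rw [List.foldl_cons, ih, innerA]
    simp [gridMatches, List.append_assoc]

lemma innerB (hex_value : String) (y : Int) (cs : List (Int × Char)) (s : Bool × Int × Int × Int × Int) :
    cs.foldl (fun s xc => if String.ofList [xc.2] = hex_value then bboxStep s y xc.1 else s) s
      = (rowMatches hex_value y cs).foldl (fun s p => bboxStep s p.1 p.2) s := by
  induction cs generalizing s with
  | nil => simp [rowMatches]
  | cons c cs ih =>
    simp only [List.foldl_cons, rowMatches, List.filterMap_cons]
    split
    · simpa [rowMatches] using ih (bboxStep s y c.1)
    · simpa [rowMatches] using ih s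

lemma outerB (hex_value : String) (l : List (Int × String)) (s : Bool × Int × Int × Int × Int) :
    l.foldl (fun s yr =>
        (PySem.List.enumerate yr.2.toList 0).foldl (fun s xc =>
          if String.ofList [xc.2] = hex_value then bboxStep s yr.1 xc.1 else s) s) s
      = (gridMatches hex_value l).foldl (fun s p => bboxStep s p.1 p.2) s := by
  induction l generalizing s with
  | nil => simp [gridMatches]
  | cons yr l ih =>
    rw [List.foldl_cons, ih, innerB]
    simp [gridMatches, List.foldl_append]

lemma bstep_true (a b c d y x : Int) :
    bboxStep (true, a, b, c, d) y x = (true, min a y, max b y, min c x, max d x) := by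
  simp only [bboxStep]
  norm_num
  refine ⟨?_, ?_, ?_, ?_⟩ <;> split <;> omega

lemma foldB_true (ms : List (Int × Int)) (a b c d : Int) :
    ms.foldl (fun s p => bboxStep s p.1 p.2) (true, a, b, c, d)
      = (true, (ms.map Prod.fst).foldl min a, (ms.map Prod.fst).foldl max b,
               (ms.map Prod.snd).foldl min c, (ms.map Prod.snd).foldl max d) := by
  induction ms generalizing a b c d with
  | nil => rfl
  | cons p ms ih => simp [bstep_true, ih]

-- ===== VERDICT (by name: the statement is the Claim_ definition above) =====
theorem compute_bbox_from_grid_spec : Claim_equal_compute_bbox_from_grid := by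
  intro grid hex_value _
  unfold Spec_compute_bbox_from_grid compute_bbox_from_grid compute_bbox_from_grid_alt
  simp only [outerA, outerB, List.nil_append]
  cases h : gridMatches hex_value (PySem.List.enumerate grid 0) with
  | nil => simp
  | cons p ms =>
    have h1 : bboxStep (false, 0, 0, 0, 0) p.1 p.2 = (true, p.1, p.1, p.2, p.2) := by
      simp [bboxStep]
    simp [List.map_cons, PySem.List.min?_id_cons, PySem.List.max?_id_cons, h1, foldB_true]
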